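-- pv_equiv track=rewrite | github.com/Vanaudel/Machine-Learning---Complex-Algorithms | Dynamic_Programming - Min_Cost_Vertex_Coloring.py | min_cost_vertex_coloring_DP
-- ===== SOURCE A (Python) =====
-- def min_cost_vertex_coloring_DP(costs):
--
--     number_nodes = len(costs)
--     number_colors = len(costs[0])
--
--     #Create an empty array to store all the Opt(k,i) values computed.
--     all_opt_ki = [[0 for i in range(number_colors)] for k in range(number_nodes)]
--
--     def Opt(k,i):
--         all_costs_k_minus_1_j = []
--         for j in range(number_colors):
--             if j != i:
--                 all_costs_k_minus_1_j.append(all_opt_ki[k-1][j])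
--         return costs[k][i] + min(all_costs_k_minus_1_j)
--
--
--     #If there are no nodes to paint then there is no cost
--     if number_nodes == 0:
--         min_cost_dp = 0
--
--     #The first node(0) colors are already known and come from costs
--     for i in range(number_colors):
--         all_opt_ki[0][i] = costs[0][i]
--
--     #Find the optimal color for all remaining nodes
--     for k in range(1, number_nodes):
--         for i in range(number_colors):
--             all_opt_ki[k][i] = Opt(k,i)
--
--     #Find the minimum cost of coloring each node
--     #The minimum cost of coloring the last node is the cumulative minimum of coloring all previous nodes
--     min_cost_dp = min(all_opt_ki[number_nodes-1])
--
--     #What is the cheapest enum of colors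
--     best_coloring_dp = []
--     min_cost_dp_k = min(all_opt_ki[number_nodes-1])
--     for k in reversed(range(number_nodes)):
--         list_vals = all_opt_ki[k]
--         min_index = list_vals.index(min_cost_dp_k)
--         best_coloring_dp.append(min_index)
--         min_cost_dp_k = min_cost_dp_k - costs[k][min_index]
--     #reverse the list
--     new_best_coloring_dp = best_coloring_dp[::-1]
--
--     return min_cost_dp, new_best_coloring_dp, all_opt_ki
-- ===== SOURCE B (Python) =====
-- def min_cost_vertex_coloring_DP(costs):
--     n = len(costs)
--     C = len(costs[0])
--     first_row = [costs[0][i] for i in range(C)]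
--     table = [first_row]
--     prev = first_row
--     for k in range(1, n):
--         m1 = min(prev)
--         j1 = prev.index(m1)
--         m2 = min(prev[:j1] + prev[j1 + 1:])
--         row = [costs[k][i] + (m2 if i == j1 else m1) for i in range(C)]
--         table.append(row)
--         prev = row
--     min_cost = min(prev)
--     coloring = []
--     target = min_cost
--     for k in range(n - 1, -1, -1):
--         idx = table[k].index(target)
--         coloring.insert(0, idx)
--         target -= costs[k][idx]
--     return min_cost, coloring, table
-- ===== Notes on version B (the rewrite author's own statement) =====
-- stated objective: faster
-- what changed: B computes each DP row from the first and second minimum of the previous row (min-excluding-color i in O(1) per color) instead of A's per-color rescans of the previous row, builds the table by appending rows instead of mutating a preallocated zero matrix, and backtracks by prepending so no final reversal is needed.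
import Mathlib
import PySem

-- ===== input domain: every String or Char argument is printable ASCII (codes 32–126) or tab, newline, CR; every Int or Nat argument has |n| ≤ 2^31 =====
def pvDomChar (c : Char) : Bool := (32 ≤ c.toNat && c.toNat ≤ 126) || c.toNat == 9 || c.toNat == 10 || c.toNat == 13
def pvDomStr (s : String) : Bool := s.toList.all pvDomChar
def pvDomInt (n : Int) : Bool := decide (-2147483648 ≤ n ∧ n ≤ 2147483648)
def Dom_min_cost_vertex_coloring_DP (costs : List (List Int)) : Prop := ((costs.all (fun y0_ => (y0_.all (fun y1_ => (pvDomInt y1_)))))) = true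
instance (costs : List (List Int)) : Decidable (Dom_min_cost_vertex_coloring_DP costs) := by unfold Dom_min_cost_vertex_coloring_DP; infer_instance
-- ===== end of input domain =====

-- B replaces A's per-color min-excluding-one scan (C scans of length C per node) by the
-- first/second minimum of the previous DP row, computed once per node; same value.

-- ===== PORT A =====
-- def Opt(k,i) of A: reads the table being filled, costs[k][i] and all_opt_ki[k-1][j]
def pvA_Opt (costs : List (List Int)) (numberColors : Nat) (allOpt : List (List Int)) (k i : Nat) : Int :=
  let allCosts := (List.range numberColors).foldl
    (fun acc j => if j ≠ i then
        acc ++ [PySem.List.pyGetD (PySem.List.pyGetD allOpt ((k : Int) - 1) []) (j : Int) 0]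
      else acc) []
  PySem.List.pyGetD (PySem.List.pyGetD costs (k : Int) []) (i : Int) 0 +
    (PySem.List.min? allCosts (fun x => x)).getD 0

-- body of 'for k in range(1, number_nodes)': the inner i-loop assigning all_opt_ki[k][i] = Opt(k,i)
def pvA_kStep (costs : List (List Int)) (numberColors : Nat) (tbl : List (List Int)) (k : Int) : List (List Int) :=
  (List.range numberColors).foldl
    (fun t i => t.set k.toNat ((PySem.List.pyGetD t k []).set i (pvA_Opt costs numberColors t k.toNat i))) tbl

-- body of the backtrack loop 'for k in reversed(range(number_nodes))'
def pvA_btStep (costs : List (List Int)) (tbl : List (List Int)) (st : List Int × Int) (k : Int) : List Int × Int :=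
  let listVals := PySem.List.pyGetD tbl k []
  let minIndex := (PySem.List.index? listVals st.2).getD 0
  (st.1 ++ [((minIndex : Nat) : Int)],
   st.2 - PySem.List.pyGetD (PySem.List.pyGetD costs k []) ((minIndex : Nat) : Int) 0)

-- literal transliteration of A; the dead 'if number_nodes == 0' branch (its variable is
-- always overwritten later, and costs[0] raises first anyway) is noted and omitted.
def min_cost_vertex_coloring_DP (costs : List (List Int)) : Int × List Int × List (List Int) :=
  let numberNodes := costs.length
  let numberColors := (PySem.List.pyGetD costs 0 []).length
  let allOpt0 : List (List Int) :=
    (List.range numberNodes).map (fun _ => (List.range numberColors).map (fun _ => (0 : Int)))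
  -- for i in range(number_colors): all_opt_ki[0][i] = costs[0][i]
  let tbl0 := (List.range numberColors).foldl
    (fun t i => t.set 0 ((PySem.List.pyGetD t 0 []).set i
        (PySem.List.pyGetD (PySem.List.pyGetD costs 0 []) (i : Int) 0))) allOpt0
  let tblF := (PySem.List.pyRange 1 (numberNodes : Int) 1).foldl (pvA_kStep costs numberColors) tbl0
  let minCost := (PySem.List.min? (PySem.List.pyGetD tblF ((numberNodes : Int) - 1) []) (fun x => x)).getD 0
  let bt := ((PySem.List.pyRange 0 (numberNodes : Int) 1).reverse).foldl (pvA_btStep costs tblF) ([], minCost)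
  let newBest := (PySem.List.slice? bt.1 none none (-1)).getD []   -- best_coloring_dp[::-1]
  (minCost, newBest, tblF)

-- ===== PORT B =====
-- one node of the DP: next row from the first/second minimum of the previous row
def pvB_step (costs : List (List Int)) (C : Nat) (st : List (List Int) × List Int) (k : Int) : List (List Int) × List Int :=
  let prev := st.2
  let m1 := (PySem.List.min? prev (fun x => x)).getD 0
  let j1 := (PySem.List.index? prev m1).getD 0
  let m2 := (PySem.List.min?
    (PySem.List.slice prev none (some (j1 : Int)) ++
     PySem.List.slice prev (some ((j1 : Int) + 1)) none) (fun x => x)).getD 0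
  let row := (List.range C).map (fun (i : Nat) =>
    PySem.List.pyGetD (PySem.List.pyGetD costs k []) (i : Int) 0 + (if i = j1 then m2 else m1))
  (st.1 ++ [row], row)

-- backtrack step, prepending so no final reversal is needed
def pvB_btStep (costs : List (List Int)) (tbl : List (List Int)) (st : List Int × Int) (k : Int) : List Int × Int :=
  let idx := (PySem.List.index? (PySem.List.pyGetD tbl k []) st.2).getD 0
  (((idx : Nat) : Int) :: st.1,
   st.2 - PySem.List.pyGetD (PySem.List.pyGetD costs k []) ((idx : Nat) : Int) 0)

def min_cost_vertex_coloring_DP_alt (costs : List (List Int)) : Int × List Int × List (List Int) :=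
  let n := costs.length
  let C := (PySem.List.pyGetD costs 0 []).length
  let firstRow := (List.range C).map (fun (i : Nat) =>
    PySem.List.pyGetD (PySem.List.pyGetD costs 0 []) (i : Int) 0)
  let st := (PySem.List.pyRange 1 (n : Int) 1).foldl (pvB_step costs C) ([firstRow], firstRow)
  let minCost := (PySem.List.min? st.2 (fun x => x)).getD 0
  let bt := (PySem.List.pyRange ((n : Int) - 1) (-1) (-1)).foldl (pvB_btStep costs st.1) ([], minCost)
  (minCost, bt.1, st.1)

-- ===== PRECONDITION & SPEC =====
-- Pre_ excludes exactly the inputs on which Python A raises: empty costs (costs[0] →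
-- IndexError), an empty first row or ≥2 nodes with a single color (min of an empty
-- list → ValueError), and a later row shorter than the first (costs[k][i] → IndexError).
def Pre_min_cost_vertex_coloring_DP (costs : List (List Int)) : Prop :=
  costs ≠ [] ∧ 1 ≤ (costs.headD []).length ∧
    (∀ r ∈ costs, (costs.headD []).length ≤ r.length) ∧
    (2 ≤ costs.length → 2 ≤ (costs.headD []).length)
instance (costs : List (List Int)) : Decidable (Pre_min_cost_vertex_coloring_DP costs) := by
  unfold Pre_min_cost_vertex_coloring_DP; infer_instance
def pvWitness_min_cost_vertex_coloring_DP : List (List Int) := [[1, 2], [3, 4]]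
def Spec_min_cost_vertex_coloring_DP (costs : List (List Int)) (out : Int × List Int × List (List Int)) : Prop := out = min_cost_vertex_coloring_DP_alt costs
instance (costs : List (List Int)) (out : Int × List Int × List (List Int)) : Decidable (Spec_min_cost_vertex_coloring_DP costs out) := by unfold Spec_min_cost_vertex_coloring_DP; infer_instance

-- ===== CLAIM (what is proved, stated in full; the proofs are below) =====
def Claim_equal_min_cost_vertex_coloring_DP : Prop := ∀ (costs : List (List Int)), Dom_min_cost_vertex_coloring_DP costs → Pre_min_cost_vertex_coloring_DP costs → Spec_min_cost_vertex_coloring_DP costs (min_cost_vertex_coloring_DP costs)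

-- ===== LEMMAS AND PROOFS =====

-- the value Opt(k,i) actually depends on the table only through row k-1
def pvOptVal (costs : List (List Int)) (C : Nat) (prev : List Int) (k i : Nat) : Int :=
  PySem.List.pyGetD (PySem.List.pyGetD costs (k : Int) []) (i : Int) 0 +
    (PySem.List.min? ((List.range C).foldl
      (fun acc j => if j ≠ i then acc ++ [PySem.List.pyGetD prev (j : Int) 0] else acc) [])
      (fun x => x)).getD 0

-- repeated r[i] := f i over range C fills the row
theorem pv_set_range (f : Nat → Int) : ∀ (C : Nat) (r : List Int), C ≤ r.length →
    (List.range C).foldl (fun r i => r.set i (f i)) r = (List.range C).map f ++ r.drop C := by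
  intro C
  induction C with
  | zero => simp
  | succ C ih =>
    intro r hr
    rw [List.range_succ, List.foldl_append, ih r (by omega)]
    have hdrop : r.drop C = r[C] :: r.drop (C + 1) := List.drop_eq_getElem_cons (by omega)
    simp only [List.foldl_cons, List.foldl_nil, List.map_append, List.map_cons, List.map_nil, hdrop]
    rw [List.set_append]
    have h0 : (List.drop C r).set 0 (f C) = f C :: List.drop (C + 1) r := by
      rw [hdrop]; rfl
    simp [h0]

-- the row-0 loop touches only the head row
theorem pv_fold_set0 (f : Nat → Int) : ∀ (L : List Nat) (row : List Int) (rest : List (List Int)),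
    L.foldl (fun t i => t.set 0 ((PySem.List.pyGetD t 0 []).set i (f i))) (row :: rest)
      = (L.foldl (fun r i => r.set i (f i)) row) :: rest := by
  intro L
  induction L with
  | nil => intro row rest; rfl
  | cons x L ih =>
    intro row rest
    rw [List.foldl_cons, show ((row :: rest).set 0 ((PySem.List.pyGetD (row :: rest) 0 []).set x (f x)))
        = (row.set x (f x)) :: rest by simp [PySem.List.pyGetD_zero]]
    rw [List.foldl_cons]
    exact ih _ _

-- Opt reads only row k-1, which the k-th inner loop never touches
theorem pvA_Opt_stable (costs : List (List Int)) (C : Nat) (front : List (List Int))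
    (rest : List (List Int)) (kn i : Nat) (hk : 1 ≤ kn) (hfront : front.length = kn) :
    pvA_Opt costs C (front ++ rest) kn i = pvOptVal costs C (front.getD (kn - 1) []) kn i := by
  unfold pvA_Opt pvOptVal
  have h1 : ((kn : Int) - 1) = ((kn - 1 : Nat) : Int) := by omega
  rw [h1, PySem.List.pyGetD_natCast]
  have h2 : (front ++ rest).getD (kn - 1) [] = front.getD (kn - 1) [] := by
    simp [List.getD, List.getElem?_append_left (show kn - 1 < front.length by omega)]
  rw [h2]

-- the inner i-loop only rewrites row k, reading the fixed row k-1
theorem pvA_kStep_fold (costs : List (List Int)) (C : Nat) (kn : Nat) (hk : 1 ≤ kn) :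
    ∀ (L : List Nat) (front : List (List Int)) (row : List Int) (rest : List (List Int)),
      front.length = kn →
      L.foldl (fun t i => t.set kn ((PySem.List.pyGetD t (kn : Int) []).set i
          (pvA_Opt costs C t kn i))) (front ++ row :: rest)
        = front ++ (L.foldl (fun r i => r.set i
            (pvOptVal costs C (front.getD (kn - 1) []) kn i)) row) :: rest := by
  intro L
  induction L with
  | nil => intro front row rest h; rfl
  | cons x L ih =>
    intro front row rest h
    rw [List.foldl_cons, List.foldl_cons]
    have hget : PySem.List.pyGetD (front ++ row :: rest) (kn : Int) [] = row := by
      rw [PySem.List.pyGetD_natCast]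
      simp [List.getD, List.getElem?_append_right (show front.length ≤ kn by omega), h]
    have hopt : pvA_Opt costs C (front ++ row :: rest) kn x
        = pvOptVal costs C (front.getD (kn - 1) []) kn x :=
      pvA_Opt_stable costs C front (row :: rest) kn x hk h
    rw [hget, hopt]
    have hset : (front ++ row :: rest).set kn (row.set x (pvOptVal costs C (front.getD (kn - 1) []) kn x))
        = front ++ (row.set x (pvOptVal costs C (front.getD (kn - 1) []) kn x)) :: rest := by
      rw [List.set_append, if_neg (by omega), h, Nat.sub_self, List.set_cons_zero]
    rw [hset]
    exact ih front _ rest h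

-- the k-th outer step rewrites exactly row k with the Opt values
theorem pvA_kStep_eq (costs : List (List Int)) (C : Nat) (front : List (List Int))
    (row : List Int) (rest : List (List Int)) (kn : Nat) (hk : 1 ≤ kn)
    (hfront : front.length = kn) (hrow : row.length = C) :
    pvA_kStep costs C (front ++ row :: rest) (kn : Int)
      = front ++ ((List.range C).map (pvOptVal costs C (front.getD (kn - 1) []) kn)) :: rest := by
  unfold pvA_kStep
  simp only [Int.toNat_natCast]
  rw [pvA_kStep_fold costs C kn hk (List.range C) front row rest hfront]
  rw [pv_set_range _ C row (by omega), List.drop_eq_nil_of_le (by omega), List.append_nil]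

-- (range l.length).map getD = the list itself
theorem pv_map_getD_range (l : List Int) : (List.range l.length).map (fun j => l.getD j 0) = l := by
  apply List.ext_getElem
  · simp
  · intro i h1 h2
    simp only [List.getElem_map, List.getElem_range]
    rw [List.getD_eq_getElem l 0 h2]

-- A's filtered scan of the previous row is that row with entry i removed
theorem pv_filter_eraseIdx : ∀ (prev : List Int) (i : Nat), i < prev.length → ∀ (acc : List Int),
    (List.range prev.length).foldl
      (fun acc j => if j ≠ i then acc ++ [PySem.List.pyGetD prev (j : Int) 0] else acc) acc
      = acc ++ (prev.take i ++ prev.drop (i + 1)) := by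
  intro prev
  induction prev with
  | nil => intro i hi; exact absurd hi (by simp)
  | cons a tl ih =>
    intro i hi acc
    rw [List.length_cons, List.range_succ_eq_map, List.foldl_cons, List.foldl_map]
    cases i with
    | zero =>
      rw [if_neg (by simp)]
      have hfun : (fun (x : List Int) (y : Nat) =>
          if y.succ ≠ 0 then x ++ [PySem.List.pyGetD (a :: tl) (y.succ : Int) 0] else x)
          = fun x y => x ++ [tl.getD y 0] := by
        funext x y
        rw [if_pos (Nat.succ_ne_zero y)]
        simp [List.getD]
        rw [show ((y : Int) + 1) = (((y + 1 : Nat)) : Int) by push_cast; ring,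
          PySem.List.pyGetD_natCast]
        simp [List.getD]
      rw [hfun, PySem.List.foldl_append_singleton_eq_map, pv_map_getD_range]
      simp
    | succ i' =>
      rw [if_pos (by omega)]
      have hfun : (fun (x : List Int) (y : Nat) =>
          if y.succ ≠ i' + 1 then x ++ [PySem.List.pyGetD (a :: tl) (y.succ : Int) 0] else x)
          = fun x y => if y ≠ i' then x ++ [PySem.List.pyGetD tl (y : Int) 0] else x := by
        funext x y
        by_cases h : y = i'
        · simp [h]
        · rw [if_pos (by omega), if_pos h]
          simp [List.getD]
          rw [show ((y : Int) + 1) = (((y + 1 : Nat)) : Int) by push_cast; ring,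
            PySem.List.pyGetD_natCast]
          simp [List.getD]
      rw [hfun, ih i' (by simpa using hi)]
      simp

-- the key fact: min over row-minus-entry-i is m1, except at the first argmin where it is m2
theorem pv_min_excl (prev : List Int) (i : Nat) (hi : i < prev.length) (h2 : 2 ≤ prev.length) :
    (PySem.List.min? (prev.take i ++ prev.drop (i + 1)) (fun x => x)).getD 0
      = (if i = (PySem.List.index? prev ((PySem.List.min? prev (fun x => x)).getD 0)).getD 0
         then (PySem.List.min?
                (prev.take ((PySem.List.index? prev ((PySem.List.min? prev (fun x => x)).getD 0)).getD 0)
                 ++ prev.drop ((PySem.List.index? prev ((PySem.List.min? prev (fun x => x)).getD 0)).getD 0 + 1))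
                (fun x => x)).getD 0
         else (PySem.List.min? prev (fun x => x)).getD 0) := by
  obtain ⟨m, hm⟩ : ∃ m, PySem.List.min? prev (fun x => x) = some m := by
    cases h : PySem.List.min? prev (fun x => x) with
    | none =>
      have := (PySem.List.min?_eq_none_iff prev (fun x => x)).1 h
      subst this; simp at h2
    | some m => exact ⟨m, rfl⟩
  have hmem := PySem.List.min?_mem hm
  have hmin := PySem.List.min?_isMin hm
  obtain ⟨j1, hj1⟩ : ∃ j1, PySem.List.index? prev m = some j1 :=
    Option.isSome_iff_exists.mp ((PySem.List.index?_isSome_iff prev m).2 hmem)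
  obtain ⟨hj1lt, hj1v, -⟩ := PySem.List.getElem_of_index?_eq_some hj1
  rw [hm]
  simp only [Option.getD_some]
  rw [hj1]
  simp only [Option.getD_some]
  by_cases hij : i = j1
  · rw [if_pos hij, hij]
  · rw [if_neg hij]
    obtain ⟨m', hm'⟩ : ∃ m', PySem.List.min? (prev.take i ++ prev.drop (i + 1)) (fun x => x) = some m' := by
      cases h : PySem.List.min? (prev.take i ++ prev.drop (i + 1)) (fun x => x) with
      | none =>
        have hnil := (PySem.List.min?_eq_none_iff _ (fun x : Int => x)).1 h
        have hlen := congrArg List.length hnil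
        simp [Nat.min_def] at hlen
        rcases hlen with ⟨ha, hb⟩
        rw [if_pos (le_of_lt hi)] at ha
        omega
      | some m' => exact ⟨m', rfl⟩
    have hmE : m ∈ prev.take i ++ prev.drop (i + 1) := by
      rcases Nat.lt_or_ge j1 i with h1 | h1
      · apply List.mem_append_left
        have hlt : j1 < (prev.take i).length := by simp; omega
        have : (prev.take i)[j1] = prev[j1] := List.getElem_take
        rw [← hj1v, ← this]
        exact List.getElem_mem hlt
      · have hgt : i + 1 ≤ j1 := by omega
        apply List.mem_append_right
        have hlt : j1 - (i + 1) < (prev.drop (i + 1)).length := by simp; omega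
        rw [List.mem_iff_getElem]
        refine ⟨j1 - (i + 1), hlt, ?_⟩
        rw [List.getElem_drop]
        simp only [show (i + 1) + (j1 - (i + 1)) = j1 from by omega]
        exact hj1v
    have hle1 : m ≤ m' := by
      apply hmin
      rcases List.mem_append.1 (PySem.List.min?_mem hm') with h | h
      · exact List.mem_of_mem_take h
      · exact List.mem_of_mem_drop h
    have hle2 : m' ≤ m := PySem.List.min?_isMin hm' m hmE
    rw [hm']
    simpa using le_antisymm hle2 hle1

-- A's new row (via Opt) equals B's new row (via first/second minimum)
theorem pv_row_eq (costs : List (List Int)) (C : Nat) (prev : List Int) (kn : Nat)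
    (hprev : prev.length = C) (h2 : 2 ≤ C) :
    (List.range C).map (pvOptVal costs C prev kn) =
      (pvB_step costs C (([] : List (List Int)), prev) ((kn : Nat) : Int)).2 := by
  unfold pvB_step
  dsimp only
  rw [PySem.List.slice_to_natCast,
    show (((PySem.List.index? prev ((PySem.List.min? prev (fun x => x)).getD 0)).getD 0 : Nat) : Int) + 1
      = (((PySem.List.index? prev ((PySem.List.min? prev (fun x => x)).getD 0)).getD 0 + 1 : Nat) : Int)
      by push_cast; ring,
    PySem.List.slice_from_natCast]
  apply List.map_congr_left
  intro i hiC
  have hi : i < prev.length := by rw [hprev]; exact List.mem_range.1 hiC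
  unfold pvOptVal
  rw [← hprev, pv_filter_eraseIdx prev i hi [], List.nil_append]
  rw [pv_min_excl prev i hi (by omega)]

-- replicate of a positive count splits off its head
theorem pv_replicate_cons {A : Type} (z : A) (k : Nat) (hk : 1 <= k) :
    List.replicate k z = z :: List.replicate (k - 1) z := by
  cases k with
  | zero => omega
  | succ k => simp [List.replicate_succ]

-- the main loop invariant: A's table = B's rows, padded with the untouched zero rows
theorem pv_inv (costs : List (List Int))
    (hC2 : 2 ≤ costs.length → 2 ≤ (PySem.List.pyGetD costs 0 []).length)
    (m : Nat) (hm : m < costs.length) :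
    ∃ rows prev,
      (PySem.List.pyRange 1 ((m : Int) + 1) 1).foldl
          (pvB_step costs (PySem.List.pyGetD costs 0 []).length)
          ([(List.range (PySem.List.pyGetD costs 0 []).length).map (fun (i : Nat) =>
              PySem.List.pyGetD (PySem.List.pyGetD costs 0 []) (i : Int) 0)],
           (List.range (PySem.List.pyGetD costs 0 []).length).map (fun (i : Nat) =>
              PySem.List.pyGetD (PySem.List.pyGetD costs 0 []) (i : Int) 0))
        = (rows ++ [prev], prev)
      ∧ rows.length = m ∧ prev.length = (PySem.List.pyGetD costs 0 []).length
      ∧ (PySem.List.pyRange 1 ((m : Int) + 1) 1).foldl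
          (pvA_kStep costs (PySem.List.pyGetD costs 0 []).length)
          ((List.range (PySem.List.pyGetD costs 0 []).length).foldl
            (fun t i => t.set 0 ((PySem.List.pyGetD t 0 []).set i
                (PySem.List.pyGetD (PySem.List.pyGetD costs 0 []) (i : Int) 0)))
            ((List.range costs.length).map (fun _ =>
              (List.range (PySem.List.pyGetD costs 0 []).length).map (fun _ => (0 : Int)))))
        = (rows ++ [prev]) ++ (List.range (costs.length - (m + 1))).map (fun _ =>
            (List.range (PySem.List.pyGetD costs 0 []).length).map (fun _ => (0 : Int))) := by
  induction m with
  | zero =>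
    refine ⟨[], (List.range (PySem.List.pyGetD costs 0 []).length).map (fun (i : Nat) =>
        PySem.List.pyGetD (PySem.List.pyGetD costs 0 []) (i : Int) 0), ?_, rfl, by simp, ?_⟩
    · rw [PySem.List.pyRange_one_eq_nil (by norm_num)]
      rfl
    · rw [PySem.List.pyRange_one_eq_nil (by norm_num)]
      simp only [List.foldl_nil]
      have h1 : (List.range costs.length).map (fun _ =>
          (List.range (PySem.List.pyGetD costs 0 []).length).map (fun _ => (0 : Int)))
          = ((List.range (PySem.List.pyGetD costs 0 []).length).map (fun _ => (0 : Int)))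
            :: (List.range (costs.length - 1)).map (fun _ =>
              (List.range (PySem.List.pyGetD costs 0 []).length).map (fun _ => (0 : Int))) := by
        simp only [List.map_const', List.length_range]
        exact pv_replicate_cons _ _ hm
      rw [h1, pv_fold_set0, pv_set_range _ _ _ (by simp), List.drop_eq_nil_of_le (by simp),
        List.append_nil]
      simp
  | succ m ih =>
    obtain ⟨rows, prev, hB, hrowsLen, hprevLen, hA⟩ := ih (by omega)
    have hks : PySem.List.pyRange 1 (((m + 1 : Nat) : Int) + 1) 1
        = PySem.List.pyRange 1 ((m : Int) + 1) 1 ++ [(m : Int) + 1] := by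
      push_cast
      exact PySem.List.pyRange_one_succ_right (by omega)
    have hcast : ((m : Int) + 1) = (((m + 1 : Nat)) : Int) := by push_cast; ring
    have hk1 : (1 : Nat) ≤ m + 1 := by omega
    have hfrontLen : (rows ++ [prev]).length = m + 1 := by simp [hrowsLen]
    have hzeros : (List.range (costs.length - (m + 1))).map (fun _ =>
        (List.range (PySem.List.pyGetD costs 0 []).length).map (fun _ => (0 : Int)))
        = ((List.range (PySem.List.pyGetD costs 0 []).length).map (fun _ => (0 : Int)))
          :: (List.range (costs.length - (m + 2))).map (fun _ =>
            (List.range (PySem.List.pyGetD costs 0 []).length).map (fun _ => (0 : Int))) := by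
      simp only [List.map_const', List.length_range]
      rw [pv_replicate_cons _ _ (show 1 ≤ costs.length - (m + 1) from by omega),
        show costs.length - (m + 1) - 1 = costs.length - (m + 2) from by omega]
    have hgetPrev : (rows ++ [prev]).getD (m + 1 - 1) [] = prev := by
      simp only [Nat.add_sub_cancel]
      simp [List.getD, List.getElem?_append_right (show rows.length ≤ m by omega), hrowsLen]
    refine ⟨rows ++ [prev],
      (pvB_step costs (PySem.List.pyGetD costs 0 []).length ([], prev) (((m + 1 : Nat)) : Int)).2,
      ?_, by simp [hrowsLen], by simp [pvB_step], ?_⟩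
    · rw [hks, List.foldl_append, hB, List.foldl_cons, List.foldl_nil, hcast]
      have hexp : pvB_step costs (PySem.List.pyGetD costs 0 []).length (rows ++ [prev], prev)
          (((m + 1 : Nat)) : Int)
          = ((rows ++ [prev]) ++ [(pvB_step costs (PySem.List.pyGetD costs 0 []).length
              ([], prev) (((m + 1 : Nat)) : Int)).2],
             (pvB_step costs (PySem.List.pyGetD costs 0 []).length
              ([], prev) (((m + 1 : Nat)) : Int)).2) := rfl
      rw [hexp]
    · rw [hks, List.foldl_append, hA, hzeros, List.foldl_cons, List.foldl_nil, hcast]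
      rw [pvA_kStep_eq costs _ (rows ++ [prev]) _ _ (m + 1) hk1 hfrontLen (by simp)]
      rw [hgetPrev]
      rw [pv_row_eq costs _ prev (m + 1) hprevLen (hC2 (by omega))]
      simp [List.append_assoc]

-- the invariant at the last node, with the zero padding gone
theorem pv_inv_final (costs : List (List Int)) (hne : costs ≠ [])
    (hC2 : 2 ≤ costs.length → 2 ≤ (PySem.List.pyGetD costs 0 []).length) :
    ∃ rows prev,
      (PySem.List.pyRange 1 ((costs.length : Nat) : Int) 1).foldl
          (pvB_step costs (PySem.List.pyGetD costs 0 []).length)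
          ([(List.range (PySem.List.pyGetD costs 0 []).length).map (fun (i : Nat) =>
              PySem.List.pyGetD (PySem.List.pyGetD costs 0 []) (i : Int) 0)],
           (List.range (PySem.List.pyGetD costs 0 []).length).map (fun (i : Nat) =>
              PySem.List.pyGetD (PySem.List.pyGetD costs 0 []) (i : Int) 0))
        = (rows ++ [prev], prev)
      ∧ rows.length = costs.length - 1
      ∧ (PySem.List.pyRange 1 ((costs.length : Nat) : Int) 1).foldl
          (pvA_kStep costs (PySem.List.pyGetD costs 0 []).length)
          ((List.range (PySem.List.pyGetD costs 0 []).length).foldl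
            (fun t i => t.set 0 ((PySem.List.pyGetD t 0 []).set i
                (PySem.List.pyGetD (PySem.List.pyGetD costs 0 []) (i : Int) 0)))
            ((List.range costs.length).map (fun _ =>
              (List.range (PySem.List.pyGetD costs 0 []).length).map (fun _ => (0 : Int)))))
        = rows ++ [prev] := by
  have hn : 1 ≤ costs.length := List.length_pos_iff.2 hne
  obtain ⟨rows, prev, hB, hrowsLen, hprevLen, hA⟩ := pv_inv costs hC2 (costs.length - 1) (by omega)
  have hcast : (((costs.length - 1 : Nat)) : Int) + 1 = ((costs.length : Nat) : Int) := by omega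
  rw [hcast] at hB hA
  have hz : costs.length - ((costs.length - 1) + 1) = 0 := by omega
  rw [hz] at hA
  simp only [List.range_zero, List.map_nil, List.append_nil] at hA
  exact ⟨rows, prev, hB, hrowsLen, hA⟩

-- appending then reversing = prepending
theorem pv_back (costs tbl : List (List Int)) : ∀ (ks : List Int) (a b : List Int) (c : Int),
    b = a.reverse →
    ks.foldl (pvB_btStep costs tbl) (b, c)
      = (((ks.foldl (pvA_btStep costs tbl) (a, c)).1).reverse,
         (ks.foldl (pvA_btStep costs tbl) (a, c)).2) := by
  intro ks
  induction ks with
  | nil => intro a b c h; simp [h]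
  | cons k ks ih =>
    intro a b c h
    simp only [List.foldl_cons]
    have hBs : pvB_btStep costs tbl (b, c) k
        = ((((PySem.List.index? (PySem.List.pyGetD tbl k []) c).getD 0 : Nat) : Int) :: b,
           c - PySem.List.pyGetD (PySem.List.pyGetD costs k [])
             (((PySem.List.index? (PySem.List.pyGetD tbl k []) c).getD 0 : Nat) : Int) 0) := rfl
    have hAs : pvA_btStep costs tbl (a, c) k
        = (a ++ [(((PySem.List.index? (PySem.List.pyGetD tbl k []) c).getD 0 : Nat) : Int)],
           c - PySem.List.pyGetD (PySem.List.pyGetD costs k [])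
             (((PySem.List.index? (PySem.List.pyGetD tbl k []) c).getD 0 : Nat) : Int) 0) := rfl
    rw [hBs, hAs]
    exact ih _ _ _ (by simp [h])

-- ===== VERDICT (by name: the statement is the Claim_ definition above) =====
theorem min_cost_vertex_coloring_DP_spec : Claim_equal_min_cost_vertex_coloring_DP := by
  intro costs _hDom hPre
  obtain ⟨hne, hC1, hrows, hC2⟩ := hPre
  unfold Spec_min_cost_vertex_coloring_DP
  have hhead : PySem.List.pyGetD costs 0 [] = costs.headD [] := by
    cases costs with
    | nil => exact absurd rfl hne
    | cons a t => simp [PySem.List.pyGetD_zero]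
  have hC2' : 2 ≤ costs.length → 2 ≤ (PySem.List.pyGetD costs 0 []).length := by
    rw [hhead]; exact hC2
  have hn : 1 ≤ costs.length := List.length_pos_iff.2 hne
  obtain ⟨rows, prev, hB, hrowsLen, hA⟩ := pv_inv_final costs hne hC2'
  unfold min_cost_vertex_coloring_DP min_cost_vertex_coloring_DP_alt
  simp only []
  rw [hA, hB]
  have hlast : PySem.List.pyGetD (rows ++ [prev]) ((costs.length : Int) - 1) [] = prev := by
    rw [show ((costs.length : Int) - 1) = (((costs.length - 1 : Nat)) : Int) by omega,
      PySem.List.pyGetD_natCast]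
    simp [List.getD, List.getElem?_append_right (show rows.length ≤ costs.length - 1 by omega),
      hrowsLen]
  rw [hlast]
  have hbtRange : PySem.List.pyRange ((costs.length : Int) - 1) (-1) (-1)
      = (PySem.List.pyRange 0 (costs.length : Int) 1).reverse := by
    rw [PySem.List.pyRange_neg_one_eq_reverse]
    norm_num
  rw [hbtRange]
  rw [pv_back costs (rows ++ [prev]) ((PySem.List.pyRange 0 (costs.length : Int) 1).reverse)
    [] [] _ rfl]
  rw [PySem.List.slice?_none_none_neg_one]
  rfl
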